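-- pv_equiv track=rewrite | github.com/NitipoomKlaynium/NeetCode | looloo.py | check_perfect_list
-- ===== SOURCE A (Python) =====
-- def check_perfect_list (numbers, distance):
--
--     n = len(numbers)
--
--     for i in range(n // 2):
--         a = 2 * i + 1
--         b = 2 * i + 2
--         if abs(numbers[i] - numbers[a]) > distance or (b < n and abs(numbers[i] - numbers[b]) > distance):
--             return False
--
--     return True
-- ===== SOURCE B (Python) =====
-- def check_perfect_list(numbers, distance):
--     parents = [p for p in numbers for _ in range(2)]
--     return all(abs(p - c) <= distance for p, c in zip(parents, numbers[1:]))
-- ===== Notes on version B (the rewrite author's own statement) =====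
-- stated objective: idiomatic
-- what changed: Replaces the index loop with early returns by a data-flow pipeline: build the parent stream by duplicating each element, zip it with the shifted list numbers[1:] so each child is paired with its parent, and reduce with all(); no index arithmetic or explicit control flow remains.
import Mathlib
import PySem

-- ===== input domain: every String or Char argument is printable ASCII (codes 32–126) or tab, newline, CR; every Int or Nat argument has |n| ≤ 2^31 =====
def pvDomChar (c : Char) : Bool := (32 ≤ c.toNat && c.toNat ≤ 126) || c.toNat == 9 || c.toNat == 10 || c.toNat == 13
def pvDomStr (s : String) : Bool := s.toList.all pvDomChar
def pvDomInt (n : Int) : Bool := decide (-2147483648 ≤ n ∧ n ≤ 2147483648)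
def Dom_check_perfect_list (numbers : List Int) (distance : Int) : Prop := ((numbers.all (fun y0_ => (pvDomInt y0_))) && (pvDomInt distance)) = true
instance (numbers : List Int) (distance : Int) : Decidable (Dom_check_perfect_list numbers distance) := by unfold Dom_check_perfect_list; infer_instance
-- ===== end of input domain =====

-- B replaces A's index loop (early returns, up to two child checks per parent) by a data-flow
-- pipeline: duplicate each element to form the parent stream, zip it with numbers[1:], reduce
-- with all(). Objective: idiomatic.

-- ===== PORT A =====
-- early-returning loop 'for i in range(n // 2)'
def check_perfect_list_go (numbers : List Int) (distance : Int) (n : Int) : List Int → Bool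
  | [] => true
  | i :: rest =>
    let a := 2 * i + 1
    let b := 2 * i + 2
    if |PySem.List.pyGetD numbers i 0 - PySem.List.pyGetD numbers a 0| > distance ∨
       (b < n ∧ |PySem.List.pyGetD numbers i 0 - PySem.List.pyGetD numbers b 0| > distance) then
      false
    else
      check_perfect_list_go numbers distance n rest

def check_perfect_list (numbers : List Int) (distance : Int) : Bool :=
  let n : Int := numbers.length
  check_perfect_list_go numbers distance n (PySem.List.pyRange 0 (PySem.Int.floordiv n 2) 1)

-- ===== PORT B =====
-- parents = [p for p in numbers for _ in range(2)]; all(...) over zip(parents, numbers[1:])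
def check_perfect_list_alt (numbers : List Int) (distance : Int) : Bool :=
  let parents := numbers.flatMap (fun p => (PySem.List.pyRange 0 2 1).map (fun _ => p))
  (parents.zip (PySem.List.slice numbers (some 1) none)).all
    (fun pc => decide (|pc.1 - pc.2| ≤ distance))

-- ===== PRECONDITION & SPEC =====
def Spec_check_perfect_list (numbers : List Int) (distance : Int) (out : Bool) : Prop := out = check_perfect_list_alt numbers distance
instance (numbers : List Int) (distance : Int) (out : Bool) : Decidable (Spec_check_perfect_list numbers distance out) := by unfold Spec_check_perfect_list; infer_instance

-- ===== CLAIM (what is proved, stated in full; the proofs are below) =====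
def Claim_equal_check_perfect_list : Prop := ∀ (numbers : List Int) (distance : Int), Dom_check_perfect_list numbers distance → Spec_check_perfect_list numbers distance (check_perfect_list numbers distance)

-- ===== LEMMAS AND PROOFS =====

theorem check_perfect_list_go_eq_true (numbers : List Int) (distance n : Int) (l : List Int) :
    check_perfect_list_go numbers distance n l = true ↔
      ∀ i ∈ l, ¬(|PySem.List.pyGetD numbers i 0 - PySem.List.pyGetD numbers (2 * i + 1) 0| > distance ∨
        (2 * i + 2 < n ∧ |PySem.List.pyGetD numbers i 0 - PySem.List.pyGetD numbers (2 * i + 2) 0| > distance)) := by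
  induction l with
  | nil => simp [check_perfect_list_go]
  | cons i rest ih =>
    simp only [check_perfect_list_go, List.mem_cons]
    split_ifs with h
    · simp only [false_iff]
      intro hc
      exact hc i (Or.inl rfl) h
    · constructor
      · intro hr j hj
        rcases hj with rfl | hj
        · exact h
        · exact (ih.mp hr) j hj
      · intro hall
        exact ih.mpr (fun j hj => hall j (Or.inr hj))

-- duplicating each element: length and elements
theorem dup_length (xs : List Int) :
    (xs.flatMap (fun p => [p, p])).length = 2 * xs.length := by
  induction xs with
  | nil => simp
  | cons x xs ih => simp [List.flatMap_cons, ih]; omega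

theorem dup_getD (xs : List Int) (k : Nat) (hk : k < 2 * xs.length) :
    (xs.flatMap (fun p => [p, p])).getD k 0 = xs.getD (k / 2) 0 := by
  induction xs generalizing k with
  | nil => simp at hk
  | cons x xs ih =>
    rcases k with _ | _ | k
    · rfl
    · rfl
    · have hk' : k < 2 * xs.length := by rw [List.length_cons] at hk; omega
      have : (k + 1 + 1) / 2 = k / 2 + 1 := by omega
      simp only [List.flatMap_cons, List.cons_append, List.getD, List.getElem?_cons_succ,
        this]
      exact ih k hk'

-- B in terms of per-child comparisons via getD
theorem alt_eq_true (numbers : List Int) (distance : Int) :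
    check_perfect_list_alt numbers distance = true ↔
      ∀ k : Nat, k + 1 < numbers.length →
        |numbers.getD (k / 2) 0 - numbers.getD (k + 1) 0| ≤ distance := by
  have hr : PySem.List.pyRange 0 2 1 = [0, 1] := by decide
  have hdup : numbers.flatMap (fun p => (PySem.List.pyRange 0 2 1).map (fun _ => p))
      = numbers.flatMap (fun p => [p, p]) := by
    simp [hr]
  have hsl : PySem.List.slice numbers (some 1) none = numbers.tail := by
    have := PySem.List.slice_from numbers (a := 1) (by omega)
    simpa [List.drop_one] using this
  unfold check_perfect_list_alt
  rw [hdup, hsl, List.all_eq_true]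
  constructor
  · intro h k hk
    have hlen : k < ((numbers.flatMap (fun p => [p, p])).zip numbers.tail).length := by
      simp [List.length_zip, List.length_tail]; omega
    have hmem := List.getElem_mem hlen
    have := h _ hmem
    rw [List.getElem_zip] at this
    have h1 : k < (numbers.flatMap (fun p => [p, p])).length := by rw [dup_length]; omega
    have h2 : k < numbers.tail.length := by simp [List.length_tail]; omega
    simp only [decide_eq_true_eq] at this
    have e1 : (numbers.flatMap (fun p => [p, p]))[k]'h1 = numbers.getD (k / 2) 0 := by
      rw [← dup_getD numbers k (by omega)]
      exact (List.getD_eq_getElem _ _ h1).symm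
    have e2 : numbers.tail[k]'h2 = numbers.getD (k + 1) 0 := by
      rw [List.getElem_tail]
      exact (List.getD_eq_getElem _ _ (by omega)).symm
    rwa [e1, e2] at this
  · intro h pc hpc
    obtain ⟨k, hlen, hget⟩ := List.mem_iff_getElem.mp hpc
    have hk : k + 1 < numbers.length := by
      simp [List.length_zip, List.length_tail] at hlen; omega
    rw [List.getElem_zip] at hget
    have h1 : k < (numbers.flatMap (fun p => [p, p])).length := by rw [dup_length]; omega
    have h2 : k < numbers.tail.length := by simp [List.length_tail]; omega
    have e1 : (numbers.flatMap (fun p => [p, p]))[k]'h1 = numbers.getD (k / 2) 0 := by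
      rw [← dup_getD numbers k (by omega)]
      exact (List.getD_eq_getElem _ _ h1).symm
    have e2 : numbers.tail[k]'h2 = numbers.getD (k + 1) 0 := by
      rw [List.getElem_tail]
      exact (List.getD_eq_getElem _ _ (by omega)).symm
    rw [← hget]
    simp only [e1, e2, decide_eq_true_eq]
    exact h k hk

-- A in terms of the same per-child comparisons
theorem a_eq_true (numbers : List Int) (distance : Int) :
    check_perfect_list numbers distance = true ↔
      ∀ k : Nat, k + 1 < numbers.length →
        |numbers.getD (k / 2) 0 - numbers.getD (k + 1) 0| ≤ distance := by
  unfold check_perfect_list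
  rw [check_perfect_list_go_eq_true]
  have hfd : PySem.Int.floordiv (numbers.length : Int) 2 = ((numbers.length / 2 : Nat) : Int) :=
    by exact_mod_cast PySem.Int.floordiv_natCast numbers.length 2
  constructor
  · intro h k hk
    -- child k+1 has parent k/2; instantiate A's condition at parent i = k/2
    have hi : (((k / 2 : Nat) : Int)) ∈ PySem.List.pyRange 0 (PySem.Int.floordiv (numbers.length : Int) 2) 1 := by
      rw [hfd, PySem.List.mem_pyRange_one]
      constructor
      · positivity
      · exact_mod_cast (by omega : k / 2 < numbers.length / 2)
    have hA := h _ hi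
    simp only [not_or, not_lt, not_and] at hA
    rcases Nat.even_or_odd k with ⟨m, hm⟩ | ⟨m, hm⟩
    · -- k = 2m even: child k+1 = 2*(k/2)+1
      have e : (2 * ((k / 2 : Nat) : Int) + 1) = ((k + 1 : Nat) : Int) := by
        push_cast; omega
      have ep : (((k / 2 : Nat) : Int)) = ((k / 2 : Nat) : Int) := rfl
      have := hA.1
      rw [e, PySem.List.pyGetD_natCast, PySem.List.pyGetD_natCast] at this
      exact this
    · -- k = 2m+1 odd: child k+1 = 2*(k/2)+2
      have e : (2 * ((k / 2 : Nat) : Int) + 2) = ((k + 1 : Nat) : Int) := by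
        push_cast; omega
      have hb : (2 * ((k / 2 : Nat) : Int) + 2) < (numbers.length : Int) := by
        rw [e]; exact_mod_cast hk
      have := hA.2 hb
      rw [e, PySem.List.pyGetD_natCast, PySem.List.pyGetD_natCast] at this
      exact this
  · intro h i hi
    rw [hfd, PySem.List.mem_pyRange_one] at hi
    obtain ⟨m, rfl⟩ : ∃ m : Nat, i = (m : Int) := ⟨i.toNat, by omega⟩
    have hm : m < numbers.length / 2 := by exact_mod_cast hi.2
    simp only [not_or, not_lt, not_and]
    constructor
    · -- child 2m+1
      have hk : (2 * m) + 1 < numbers.length := by omega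
      have := h (2 * m) hk
      have e1 : (2 * (m : Int) + 1) = ((2 * m + 1 : Nat) : Int) := by push_cast; ring
      have e2 : (2 * m) / 2 = m := by omega
      rw [e2] at this
      rw [e1, PySem.List.pyGetD_natCast, PySem.List.pyGetD_natCast]
      exact this
    · intro hb
      -- child 2m+2
      have hk : (2 * m + 1) + 1 < numbers.length := by omega
      have := h (2 * m + 1) hk
      have e1 : (2 * (m : Int) + 2) = ((2 * m + 1 + 1 : Nat) : Int) := by push_cast; ring
      have e2 : (2 * m + 1) / 2 = m := by omega
      rw [e2] at this
      rw [e1, PySem.List.pyGetD_natCast, PySem.List.pyGetD_natCast]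
      exact this

-- ===== VERDICT (by name: the statement is the Claim_ definition above) =====
theorem check_perfect_list_spec : Claim_equal_check_perfect_list := by
  intro numbers distance _
  unfold Spec_check_perfect_list
  rw [Bool.eq_iff_iff, a_eq_true, alt_eq_true]
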